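-- pv_equiv track=rewrite | github.com/zooniezi/algorithm | 프로그래머스/1/42840. 모의고사/모의고사.py | solution
-- ===== SOURCE A (Python) =====
-- def solution(answers):
--     l = len(answers)
--     p1 = [i%5+1 for i in range(l)]
--     p2 = [2 for i in range(l)]
--     p3 = [3 for i in range(l)]
--     for i in range(l):
--         if i%2==0:
--             continue
--         else:
--             idx = (i//2)%4
--             if idx == 0:
--                 p2[i] = 1
--             if idx == 1:
--                 p2[i] = 3
--             if idx == 2:
--                 p2[i] = 4
--             if idx == 3:
--                 p2[i] = 5
--     for i in range(l):
--         idx = i % 10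
--         if idx <= 1:
--             continue
--         elif idx <= 3:
--             p3[i] = 1
--         elif idx <= 5:
--             p3[i] = 2
--         elif idx <= 7:
--             p3[i] = 4
--         else:
--             p3[i] = 5
--
--     cnt = [0,0,0]
--     for i in range(l):
--         if p1[i] == answers[i]:
--             cnt[0]+=1
--         if p2[i] == answers[i]:
--             cnt[1]+=1
--         if p3[i] == answers[i]:
--             cnt[2]+=1
--     max_cnt = max(cnt)
--
--     answer = []
--     for i in range(3):
--         if cnt[i] == max_cnt:
--             answer.append(i+1)
--
--     return answer
-- ===== SOURCE B (Python) =====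
-- def solution(answers):
--     # One pass builds a frequency table keyed by (position mod 40, answer value);
--     # 40 is a common period of all three supervisors' cycles, so each score is
--     # then read off the table with 40 lookups instead of rescanning the answers.
--     freq = {}
--     for i, a in enumerate(answers):
--         k = (i % 40, a)
--         freq[k] = freq.get(k, 0) + 1
--     pats = [[1, 2, 3, 4, 5], [2, 1, 2, 3, 2, 4, 2, 5], [3, 3, 1, 1, 2, 2, 4, 4, 5, 5]]
--     cnt = [sum(freq.get((r, p[r % len(p)]), 0) for r in range(40)) for p in pats]
--     m = max(cnt)
--     return [j + 1 for j in range(3) if cnt[j] == m]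
-- ===== Notes on version B (the rewrite author's own statement) =====
-- stated objective: alternative
-- what changed: B replaces A's three full-length precomputed pattern arrays and per-element comparisons by a single pass that builds a frequency dictionary keyed by (index mod 40, answer value) -- 40 being a common period of all three cycles -- and then reads each supervisor's score off that table with 40 dictionary lookups.
import Mathlib
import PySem

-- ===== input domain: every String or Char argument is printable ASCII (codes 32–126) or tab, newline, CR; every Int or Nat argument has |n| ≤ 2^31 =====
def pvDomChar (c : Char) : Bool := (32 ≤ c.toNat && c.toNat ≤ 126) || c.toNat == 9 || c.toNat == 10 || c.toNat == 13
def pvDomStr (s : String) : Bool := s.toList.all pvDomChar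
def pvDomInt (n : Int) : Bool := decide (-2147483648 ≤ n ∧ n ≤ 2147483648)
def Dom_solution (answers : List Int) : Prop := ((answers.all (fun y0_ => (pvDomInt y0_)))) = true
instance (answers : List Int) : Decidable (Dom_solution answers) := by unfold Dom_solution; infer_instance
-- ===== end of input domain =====

-- B replaces A's three full-length precomputed pattern arrays and per-element comparisons by one
-- pass building a frequency dictionary keyed by (index mod 40, answer value) — 40 is a common
-- period of the three cycles — and reads each score off the table with 40 lookups (objective: alternative).

-- ===== PORT A =====
-- body of A's p2 loop ('for i in range(l): if i%2==0: continue else: …'), step for step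
def stepP2 (a : List Int) (i : Int) : List Int :=
  if PySem.Int.mod i 2 == 0 then a
  else
    let idx := PySem.Int.mod (PySem.Int.floordiv i 2) 4
    let a := if idx == 0 then PySem.List.pySetD a i 1 else a
    let a := if idx == 1 then PySem.List.pySetD a i 3 else a
    let a := if idx == 2 then PySem.List.pySetD a i 4 else a
    let a := if idx == 3 then PySem.List.pySetD a i 5 else a
    a

-- body of A's p3 loop, step for step
def stepP3 (a : List Int) (i : Int) : List Int :=
  let idx := PySem.Int.mod i 10
  if idx ≤ 1 then a
  else if idx ≤ 3 then PySem.List.pySetD a i 1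
  else if idx ≤ 5 then PySem.List.pySetD a i 2
  else if idx ≤ 7 then PySem.List.pySetD a i 4
  else PySem.List.pySetD a i 5

-- p1 = [i%5+1 for i in range(l)]
def buildP1 (l : Int) : List Int :=
  (PySem.List.pyRange 0 l 1).map (fun i => PySem.Int.mod i 5 + 1)

-- p2 = [2 for i in range(l)], then the mutation loop
def buildP2 (l : Int) : List Int :=
  (PySem.List.pyRange 0 l 1).foldl stepP2 ((PySem.List.pyRange 0 l 1).map (fun _ => (2 : Int)))

-- p3 = [3 for i in range(l)], then the mutation loop
def buildP3 (l : Int) : List Int :=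
  (PySem.List.pyRange 0 l 1).foldl stepP3 ((PySem.List.pyRange 0 l 1).map (fun _ => (3 : Int)))

-- body of A's counting loop; cnt = [0,0,0] carried as a triple of its three cells
def countStep (p1 p2 p3 answers : List Int) (c : Int × Int × Int) (i : Int) : Int × Int × Int :=
  let c0 := if PySem.List.pyGetD p1 i 0 == PySem.List.pyGetD answers i 0 then c.1 + 1 else c.1
  let c1 := if PySem.List.pyGetD p2 i 0 == PySem.List.pyGetD answers i 0 then c.2.1 + 1 else c.2.1
  let c2 := if PySem.List.pyGetD p3 i 0 == PySem.List.pyGetD answers i 0 then c.2.2 + 1 else c.2.2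
  (c0, c1, c2)

def solution (answers : List Int) : List Int :=
  let l : Int := PySem.List.len answers
  let p1 := buildP1 l
  let p2 := buildP2 l
  let p3 := buildP3 l
  let cnt := (PySem.List.pyRange 0 l 1).foldl (countStep p1 p2 p3 answers) (0, 0, 0)
  let max_cnt := max cnt.1 (max cnt.2.1 cnt.2.2)
  -- for i in range(3): if cnt[i] == max_cnt: answer.append(i+1)   (unrolled over the three cells)
  ((if cnt.1 == max_cnt then [1] else []) ++ (if cnt.2.1 == max_cnt then [2] else []) ++
   (if cnt.2.2 == max_cnt then [3] else []))

-- ===== PORT B =====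
def pvPat1 : List Int := [1, 2, 3, 4, 5]
def pvPat2 : List Int := [2, 1, 2, 3, 2, 4, 2, 5]
def pvPat3 : List Int := [3, 3, 1, 1, 2, 2, 4, 4, 5, 5]

-- k = (i % 40, a)
def keyOf (q : Int × Int) : Int × Int := (PySem.Int.mod q.1 40, q.2)

-- body of Source B's counting loop: freq[k] = freq.get(k, 0) + 1
def freqStep (d : PySem.Dict (Int × Int) Int) (q : Int × Int) : PySem.Dict (Int × Int) Int :=
  d.insert (keyOf q) (d.getD (keyOf q) 0 + 1)

-- sum(freq.get((r, p[r % len(p)]), 0) for r in range(40))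
def cntFor (d : PySem.Dict (Int × Int) Int) (p : List Int) : Int :=
  ((PySem.List.pyRange 0 40 1).map (fun r =>
    d.getD (r, PySem.List.pyGetD p (PySem.Int.mod r (PySem.List.len p)) 0) 0)).sum

def solution_alt (answers : List Int) : List Int :=
  let freq := (PySem.List.enumerate answers 0).foldl freqStep PySem.Dict.empty
  let c1 := cntFor freq pvPat1
  let c2 := cntFor freq pvPat2
  let c3 := cntFor freq pvPat3
  let m := max c1 (max c2 c3)
  -- [j + 1 for j in range(3) if cnt[j] == m]   (unrolled over the three cells)
  ((if c1 == m then [1] else []) ++ (if c2 == m then [2] else []) ++ (if c3 == m then [3] else []))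

-- ===== PRECONDITION & SPEC =====
def Spec_solution (answers : List Int) (out : List Int) : Prop := out = solution_alt answers
instance (answers : List Int) (out : List Int) : Decidable (Spec_solution answers out) := by unfold Spec_solution; infer_instance

-- ===== CLAIM (what is proved, stated in full; the proofs are below) =====
def Claim_equal_solution : Prop := ∀ (answers : List Int), Dom_solution answers → Spec_solution answers (solution answers)

-- ===== LEMMAS AND PROOFS =====

-- the per-element match indicator both counts reduce to
def ind (p : List Int) (q : Int × Int) : Int :=
  if PySem.List.pyGetD p (PySem.Int.mod q.1 (PySem.List.len p)) 0 == q.2 then 1 else 0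

-- proof-side per-element form of A's counting loop
def matchStep (c : Int × Int × Int) (q : Int × Int) : Int × Int × Int :=
  (c.1 + ind pvPat1 q, c.2.1 + ind pvPat2 q, c.2.2 + ind pvPat3 q)

-- value A's p2 loop writes at an odd index j
def g2 (j : Nat) : Int :=
  if (j / 2) % 4 = 0 then 1 else if (j / 2) % 4 = 1 then 3 else if (j / 2) % 4 = 2 then 4 else 5

-- value A's p3 loop writes at an index j with 2 ≤ j % 10
def g3 (j : Nat) : Int :=
  if j % 10 ≤ 3 then 1 else if j % 10 ≤ 5 then 2 else if j % 10 ≤ 7 then 4 else 5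

theorem length_stepP2 (a : List Int) (i : Int) : (stepP2 a i).length = a.length := by
  simp only [stepP2, apply_ite (List.length (α := Int)), PySem.List.length_pySetD, ite_self]

theorem length_stepP3 (a : List Int) (i : Int) : (stepP3 a i).length = a.length := by
  simp only [stepP3, apply_ite (List.length (α := Int)), PySem.List.length_pySetD, ite_self]

theorem length_foldl_of_pres {f : List Int → Int → List Int}
    (hf : ∀ a i, (f a i).length = a.length) :
    ∀ (l : List Int) (xs : List Int), (l.foldl f xs).length = xs.length := by
  intro l
  induction l with
  | nil => intro xs; rfl
  | cons x t ih => intro xs; simp [List.foldl_cons, ih, hf]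

theorem stepP2_even (a : List Int) (n : Nat) (h : n % 2 = 0) : stepP2 a ((n : Nat) : Int) = a := by
  unfold stepP2
  rw [show ((2:Int)) = (((2:Nat)) : Int) from rfl, PySem.Int.mod_natCast, h]
  simp

theorem stepP2_odd (a : List Int) (n : Nat) (h : n % 2 = 1) :
    stepP2 a ((n : Nat) : Int) = PySem.List.pySetD a ((n : Nat) : Int) (g2 n) := by
  unfold stepP2
  rw [show ((2:Int)) = (((2:Nat)) : Int) from rfl, PySem.Int.mod_natCast, h]
  simp only [Nat.cast_one, show ((1 : Int) == 0) = false by decide, Bool.false_eq_true, if_false]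
  have hfd : PySem.Int.mod (PySem.Int.floordiv ((n : Nat) : Int) ((2:Nat) : Int)) 4
      = (((n / 2) % 4 : Nat) : Int) := by
    rw [PySem.Int.floordiv_natCast, show ((4:Int)) = (((4:Nat)) : Int) from rfl,
      PySem.Int.mod_natCast]
  rw [hfd]
  have hr4 : (n / 2) % 4 < 4 := Nat.mod_lt _ (by norm_num)
  set r := (n / 2) % 4 with hr
  interval_cases r <;> simp [g2, ← hr]

theorem stepP3_low (a : List Int) (n : Nat) (h : n % 10 ≤ 1) : stepP3 a ((n : Nat) : Int) = a := by
  unfold stepP3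
  rw [show ((10:Int)) = (((10:Nat)) : Int) from rfl, PySem.Int.mod_natCast]
  rw [if_pos (by exact_mod_cast h)]

theorem stepP3_high (a : List Int) (n : Nat) (h : 2 ≤ n % 10) :
    stepP3 a ((n : Nat) : Int) = PySem.List.pySetD a ((n : Nat) : Int) (g3 n) := by
  unfold stepP3
  rw [show ((10:Int)) = (((10:Nat)) : Int) from rfl, PySem.Int.mod_natCast]
  have hr10 : n % 10 < 10 := Nat.mod_lt _ (by norm_num)
  set r := n % 10 with hr
  interval_cases r <;> simp [g3, ← hr]

theorem getD_fold_set {step : List Int → Int → List Int}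
    (hl : ∀ a i, (step a i).length = a.length)
    (cond : Nat → Prop) [DecidablePred cond] (g : Nat → Int)
    (hskip : ∀ (a : List Int) (n : Nat), ¬ cond n → step a ((n : Nat) : Int) = a)
    (hset : ∀ (a : List Int) (n : Nat), cond n →
      step a ((n : Nat) : Int) = PySem.List.pySetD a ((n : Nat) : Int) (g n)) :
    ∀ (n : Nat) (xs : List Int), n ≤ xs.length → ∀ (j : Nat), j < xs.length →
    PySem.List.pyGetD ((PySem.List.pyRange 0 (n : Int) 1).foldl step xs) ((j : Nat) : Int) 0
      = if j < n ∧ cond j then g j else PySem.List.pyGetD xs ((j : Nat) : Int) 0 := by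
  intro n
  induction n with
  | zero =>
    intro xs _ j hj
    simp [PySem.List.pyRange_one_eq_nil]
  | succ n ih =>
    intro xs hn j hj
    have hcast : ((n + 1 : Nat) : Int) = (n : Int) + 1 := by push_cast; ring
    rw [hcast, PySem.List.pyRange_one_succ_right (by positivity), List.foldl_append]
    have hlen : ((PySem.List.pyRange 0 (n : Int) 1).foldl step xs).length = xs.length :=
      length_foldl_of_pres hl _ _
    simp only [List.foldl_cons, List.foldl_nil]
    by_cases hc : cond n
    · rw [hset _ _ hc, PySem.List.pyGetD_pySetD_natCast _ n j _ _ (by omega)]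
      by_cases hje : j = n
      · rw [if_pos hje, if_pos ⟨by omega, hje ▸ hc⟩, hje]
      · have hjne : j ≠ n := hje
        rw [if_neg hje, ih xs (by omega) j hj]
        by_cases hcj : cond j
        · by_cases hjlt : j < n
          · rw [if_pos ⟨hjlt, hcj⟩, if_pos ⟨by omega, hcj⟩]
          · rw [if_neg (fun h => hjlt h.1), if_neg (fun h => hjlt (by omega))]
        · rw [if_neg (fun h => hcj h.2), if_neg (fun h => hcj h.2)]
    · rw [hskip _ _ hc, ih xs (by omega) j hj]
      by_cases hcj : cond j
      · have hjne : j ≠ n := fun h => hc (h ▸ hcj)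
        by_cases hjlt : j < n
        · rw [if_pos ⟨hjlt, hcj⟩, if_pos ⟨by omega, hcj⟩]
        · rw [if_neg (fun h => hjlt h.1), if_neg (fun h => hjlt (by omega))]
      · rw [if_neg (fun h => hcj h.2), if_neg (fun h => hcj h.2)]

theorem getD_buildP1 (l : Nat) (j : Nat) (hj : j < l) :
    PySem.List.pyGetD (buildP1 (l : Int)) ((j : Nat) : Int) 0
      = PySem.Int.mod ((j : Nat) : Int) 5 + 1 := by
  unfold buildP1
  rw [PySem.List.pyGetD_map_pyRange _ l j _ hj]

theorem getD_buildP2 (l : Nat) (j : Nat) (hj : j < l) :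
    PySem.List.pyGetD (buildP2 (l : Int)) ((j : Nat) : Int) 0
      = if j % 2 = 1 then g2 j else 2 := by
  unfold buildP2
  have hlen : ((PySem.List.pyRange 0 (l : Int) 1).map (fun _ => (2 : Int))).length = l := by
    simp [PySem.List.length_pyRange_one]
  rw [getD_fold_set length_stepP2 (fun n => n % 2 = 1) g2
    (fun a n h => stepP2_even a n (by omega)) (fun a n h => stepP2_odd a n h)
    l _ (by omega) j (by omega)]
  rw [PySem.List.pyGetD_map_pyRange _ l j _ hj]
  simp [hj]

theorem getD_buildP3 (l : Nat) (j : Nat) (hj : j < l) :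
    PySem.List.pyGetD (buildP3 (l : Int)) ((j : Nat) : Int) 0
      = if 2 ≤ j % 10 then g3 j else 3 := by
  unfold buildP3
  have hlen : ((PySem.List.pyRange 0 (l : Int) 1).map (fun _ => (3 : Int))).length = l := by
    simp [PySem.List.length_pyRange_one]
  rw [getD_fold_set length_stepP3 (fun n => 2 ≤ n % 10) g3
    (fun a n h => stepP3_low a n (by omega)) (fun a n h => stepP3_high a n h)
    l _ (by omega) j (by omega)]
  rw [PySem.List.pyGetD_map_pyRange _ l j _ hj]
  simp [hj]

theorem patEq1 (j : Nat) :
    PySem.Int.mod ((j : Nat) : Int) 5 + 1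
      = PySem.List.pyGetD pvPat1 (PySem.Int.mod ((j : Nat) : Int) (PySem.List.len pvPat1)) 0 := by
  rw [show (PySem.List.len pvPat1) = (((5:Nat)) : Int) from rfl,
    show ((5:Int)) = (((5:Nat)) : Int) from rfl, PySem.Int.mod_natCast]
  have h5 : j % 5 < 5 := Nat.mod_lt _ (by norm_num)
  set r := j % 5 with hr
  interval_cases r <;> decide

theorem patEq2 (j : Nat) :
    (if j % 2 = 1 then g2 j else 2)
      = PySem.List.pyGetD pvPat2 (PySem.Int.mod ((j : Nat) : Int) (PySem.List.len pvPat2)) 0 := by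
  rw [show (PySem.List.len pvPat2) = (((8:Nat)) : Int) from rfl, PySem.Int.mod_natCast]
  unfold g2
  have h2 : j % 2 = j % 8 % 2 := by omega
  have h4 : j / 2 % 4 = j % 8 / 2 := by omega
  rw [h2, h4]
  have h8 : j % 8 < 8 := Nat.mod_lt _ (by norm_num)
  set r := j % 8 with hr
  interval_cases r <;> decide

theorem patEq3 (j : Nat) :
    (if 2 ≤ j % 10 then g3 j else 3)
      = PySem.List.pyGetD pvPat3 (PySem.Int.mod ((j : Nat) : Int) (PySem.List.len pvPat3)) 0 := by
  rw [show (PySem.List.len pvPat3) = (((10:Nat)) : Int) from rfl, PySem.Int.mod_natCast]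
  unfold g3
  have h10 : j % 10 < 10 := Nat.mod_lt _ (by norm_num)
  set r := j % 10 with hr
  interval_cases r <;> decide

-- A's counting fold = per-element indicator fold over enumerate(answers)
theorem cnt_eq (answers : List Int) :
    (PySem.List.pyRange 0 (PySem.List.len answers) 1).foldl
        (countStep (buildP1 (PySem.List.len answers)) (buildP2 (PySem.List.len answers))
          (buildP3 (PySem.List.len answers)) answers) (0, 0, 0)
      = (PySem.List.enumerate answers 0).foldl matchStep (0, 0, 0) := by
  rw [PySem.List.enumerate_eq_map_pyRange answers 0, List.foldl_map]
  apply PySem.List.foldl_congr_mem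
  intro c i hi
  rw [PySem.List.mem_pyRange_one] at hi
  obtain ⟨h0, hlt⟩ := hi
  have hjl : i.toNat < answers.length := by
    rw [PySem.List.len_eq] at hlt; omega
  have hij : i = ((i.toNat : Nat) : Int) := (Int.toNat_of_nonneg h0).symm
  rw [hij]
  set j := i.toNat with hj
  unfold countStep matchStep ind
  rw [PySem.List.len_eq]
  rw [getD_buildP1 answers.length j hjl, getD_buildP2 answers.length j hjl,
    getD_buildP3 answers.length j hjl, patEq1 j, patEq2 j, patEq3 j]
  dsimp only
  split_ifs <;> simp

-- the indicator fold is the triple of indicator sums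
theorem matchFold (ps : List (Int × Int)) (c : Int × Int × Int) :
    ps.foldl matchStep c
      = (c.1 + (ps.map (ind pvPat1)).sum, c.2.1 + (ps.map (ind pvPat2)).sum,
         c.2.2 + (ps.map (ind pvPat3)).sum) := by
  induction ps generalizing c with
  | nil => simp
  | cons q t ih =>
    simp only [List.foldl_cons, List.map_cons, List.sum_cons, ih, matchStep]
    refine Prod.ext (by ring) (Prod.ext (by ring) (by ring))

-- the dictionary the B fold builds answers lookups by counting keys
theorem freq_getD (ps : List (Int × Int)) (k : Int × Int) :
    (ps.foldl freqStep PySem.Dict.empty).getD k 0 = ((ps.map keyOf).count k : Int) := by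
  have h : ps.foldl freqStep PySem.Dict.empty
      = (ps.map keyOf).foldl (fun d x => d.insert x (d.getD x 0 + 1)) PySem.Dict.empty := by
    rw [List.foldl_map]; rfl
  rw [h, PySem.Dict.getD_foldl_insert_add_one]
  simp [PySem.Dict.empty, PySem.Dict.getD, PySem.Dict.get?]

theorem mod40_bounds (i : Int) : 0 ≤ PySem.Int.mod i 40 ∧ PySem.Int.mod i 40 < 40 := by
  show 0 ≤ i.fmod 40 ∧ i.fmod 40 < 40
  simp [Int.fmod_eq_emod]
  exact ⟨Int.emod_nonneg i (by norm_num), Int.emod_lt_of_pos i (by norm_num)⟩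

theorem modmod (m i : Int) (hm : 0 < m) (hdvd : m ∣ 40) :
    PySem.Int.mod (PySem.Int.mod i 40) m = PySem.Int.mod i m := by
  show (i.fmod 40).fmod m = i.fmod m
  have h0 : 0 ≤ m := le_of_lt hm
  simp [Int.fmod_eq_emod, h0]
  exact Int.emod_emod_of_dvd i hdvd

-- a 0/1 sum over range n with a single possibly-nonzero term
theorem sum_single (n : Nat) (f : Nat → Int) (r0 : Nat) (h : r0 < n)
    (h0 : ∀ r, r ≠ r0 → f r = 0) :
    ((List.range n).map f).sum = f r0 := by
  induction n with
  | zero => omega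
  | succ n ih =>
    rw [List.range_succ, List.map_append, List.sum_append]
    by_cases hr : r0 = n
    · subst hr
      have : ((List.range r0).map f).sum = 0 := by
        apply List.sum_eq_zero
        intro x hx
        obtain ⟨r, hr, rfl⟩ := List.mem_map.mp hx
        exact h0 r (by rw [List.mem_range] at hr; omega)
      simp [this]
    · rw [ih (by omega)]
      simp [h0 n (by omega)]

-- summing a key's count over the 40 residues = summing the match indicator over the list
theorem count_range (L : List (Int × Int)) (v : Int → Int)
    (hL : ∀ x ∈ L, 0 ≤ x.1 ∧ x.1 < 40) :
    ((List.range 40).map (fun r => (L.count (((r : Nat) : Int), v ((r : Nat) : Int)) : Int))).sum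
      = (L.map (fun x => if v x.1 == x.2 then (1 : Int) else 0)).sum := by
  induction L with
  | nil => simp
  | cons a t ih =>
    have ha := hL a (by simp)
    have hbody : (fun r : Nat => (((a :: t).count (((r : Nat) : Int), v ((r : Nat) : Int))) : Int))
        = fun r : Nat => ((t.count (((r : Nat) : Int), v ((r : Nat) : Int))) : Int)
          + (if a == (((r : Nat) : Int), v ((r : Nat) : Int)) then (1 : Int) else 0) := by
      funext r
      rw [List.count_cons]
      push_cast
      split_ifs <;> simp
    rw [hbody, PySem.List.sum_map_add_int, ih (fun x hx => hL x (by simp [hx]))]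
    have hsingle : ((List.range 40).map
        (fun r : Nat => (if a == (((r : Nat) : Int), v ((r : Nat) : Int)) then (1 : Int) else 0))).sum
        = if v a.1 == a.2 then (1 : Int) else 0 := by
      rw [sum_single 40 _ a.1.toNat (by omega)]
      · have h1 : ((a.1.toNat : Nat) : Int) = a.1 := Int.toNat_of_nonneg ha.1
        rw [h1]
        rcases a with ⟨a1, a2⟩
        simp only [beq_iff_eq]
        by_cases hv : v a1 = a2
        · rw [if_pos (by rw [hv]), if_pos hv]
        · rw [if_neg (fun h => hv (congrArg Prod.snd h).symm), if_neg hv]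
      · intro r hr
        have : ((r : Nat) : Int) ≠ a.1 := by
          intro hcontra
          apply hr
          omega
        simp only [beq_iff_eq, Prod.ext_iff]
        rw [if_neg]
        rintro ⟨h1, -⟩
        exact this h1.symm
    rw [hsingle]
    simp [List.map_cons, List.sum_cons]
    ring

-- B's per-pattern 40-lookup sum = the indicator sum over enumerate(answers)
theorem cntFor_eq (answers : List Int) (p : List Int) (hm : 0 < PySem.List.len p)
    (hdvd : PySem.List.len p ∣ 40) :
    cntFor ((PySem.List.enumerate answers 0).foldl freqStep PySem.Dict.empty) p
      = ((PySem.List.enumerate answers 0).map (ind p)).sum := by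
  unfold cntFor
  rw [PySem.List.pyRange_one]
  have h40 : ((40 : Int) - 0).toNat = 40 := by decide
  rw [h40, List.map_map]
  have hbody : ((fun r =>
        ((PySem.List.enumerate answers 0).foldl freqStep PySem.Dict.empty).getD
          (r, PySem.List.pyGetD p (PySem.Int.mod r (PySem.List.len p)) 0) 0) ∘ fun k : Nat => (0 : Int) + ↑k)
      = fun r : Nat => ((((PySem.List.enumerate answers 0).map keyOf).count
          (((r : Nat) : Int), (fun t => PySem.List.pyGetD p (PySem.Int.mod t (PySem.List.len p)) 0) ((r : Nat) : Int))) : Int) := by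
    funext r
    simp only [Function.comp, zero_add, freq_getD]
  rw [hbody]
  have hmain := count_range ((PySem.List.enumerate answers 0).map keyOf)
      (fun t => PySem.List.pyGetD p (PySem.Int.mod t (PySem.List.len p)) 0) (by
    intro x hx
    obtain ⟨q, hq, rfl⟩ := List.mem_map.mp hx
    exact mod40_bounds q.1)
  rw [hmain, List.map_map]
  congr 1
  apply List.map_congr_left
  intro q hq
  simp only [Function.comp_apply, keyOf, ind, modmod _ q.1 hm hdvd]

-- ===== VERDICT (by name: the statement is the Claim_ definition above) =====
theorem solution_spec : Claim_equal_solution := by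
  unfold Claim_equal_solution Spec_solution
  intro answers _
  unfold solution solution_alt
  dsimp only
  rw [cnt_eq answers, matchFold,
    cntFor_eq answers pvPat1 (by decide) (by decide), cntFor_eq answers pvPat2 (by decide) (by decide),
    cntFor_eq answers pvPat3 (by decide) (by decide)]
  simp
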